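-- pv_equiv track=rewrite | github.com/GitOnUp/aoc25 | src/aoc25/p03.py | largest_joltage_iter
-- ===== SOURCE A (Python) =====
-- def largest_joltage_iter(bank: list[int], num: int, concat: str) -> str | None:
--     if num == 0:
--         return concat
--     if len(bank) < num:
--         return None
--     for digit in range(9, 0, -1):
--         for i, bank_digit in enumerate(bank):
--             if bank_digit == digit:
--                 check = largest_joltage_iter(bank[i+1:], num-1, concat + str(digit))
--                 if check is not None:
--                     return check
--                 else:
--                     break
--     return None
-- ===== SOURCE B (Python) =====
-- def largest_joltage_iter(bank: list[int], num: int, concat: str) -> str | None: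
--     if num == 0:
--         return concat
--     if num < 0:
--         return None
--     digits = [d for d in bank if 1 <= d <= 9]
--     if len(digits) < num:
--         return None
--     return concat + _greedy(digits, num)
--
--
-- def _greedy(digits: list[int], num: int) -> str:
--     # picks the first maximum of the feasible window, then recurses on the suffix
--     if num <= 0:
--         return ""
--     end = len(digits) - num + 1
--     best = 0
--     for j in range(1, end):
--         if digits[j] > digits[best]:
--             best = j
--     return str(digits[best]) + _greedy(digits[best + 1:], num - 1)
-- ===== Notes on version B (the rewrite author's own statement) =====
-- stated objective: faster
-- what changed: Replaced A's backtracking recursion that tries digit values 9..1 and recurses on each suffix with a single filter of the bank to its usable digits followed by an iterative windowed-argmax greedy selection with no backtracking.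
import Mathlib
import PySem

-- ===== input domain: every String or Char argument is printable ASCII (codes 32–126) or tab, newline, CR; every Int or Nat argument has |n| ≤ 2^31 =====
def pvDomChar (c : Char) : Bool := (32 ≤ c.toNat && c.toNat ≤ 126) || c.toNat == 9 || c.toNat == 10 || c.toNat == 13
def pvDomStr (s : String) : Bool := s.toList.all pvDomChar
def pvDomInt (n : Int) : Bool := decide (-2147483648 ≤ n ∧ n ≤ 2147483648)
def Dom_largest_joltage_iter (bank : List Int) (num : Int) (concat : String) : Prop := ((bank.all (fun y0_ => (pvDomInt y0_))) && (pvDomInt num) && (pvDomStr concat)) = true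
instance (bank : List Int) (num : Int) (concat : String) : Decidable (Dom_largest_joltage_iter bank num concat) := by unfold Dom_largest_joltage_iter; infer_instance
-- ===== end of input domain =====

-- B replaces A's backtracking recursion over digit values 9..1 with a single
-- filter + windowed-argmax greedy pass (no backtracking); objective: faster.

-- ===== PORT A =====
-- inner 'for i, bank_digit in enumerate(bank): if bank_digit == digit:' — first index of digit
def ljScan : List Int → Int → Nat → Option Nat
  | [], _, _ => none
  | b :: bs, d, i => if b = d then some i else ljScan bs d (i + 1)

-- 'for digit in range(9, 0, -1)' with Python's break/continue structure; 'recur' is the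
-- recursive call of largest_joltage_iter (supplied with one unit of fuel less)
def ljOuter (recur : List Int → Int → String → Option String) (bank : List Int) (num : Int)
    (concat : String) : List Int → Option String
  | [] => none
  | d :: rest =>
    match ljScan bank d 0 with
    | none => ljOuter recur bank num concat rest
    | some i =>
      match recur (PySem.List.slice bank (some ((i : Int) + 1)) none) (num - 1) (concat ++ PySem.Int.toStr d) with
      | some s => some s
      | none => ljOuter recur bank num concat rest

-- fuel = recursion depth bound; each recursive call is on a strictly shorter bank,
-- so fuel bank.length+1 at the top is always sufficient (proved in the lemmas)
def ljFuel : Nat → List Int → Int → String → Option String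
  | 0, _, _, _ => none
  | f + 1, bank, num, concat =>
    if num = 0 then some concat
    else if (bank.length : Int) < num then none
    else ljOuter (ljFuel f) bank num concat (PySem.List.pyRange 9 0 (-1))

def largest_joltage_iter (bank : List Int) (num : Int) (concat : String) : Option String :=
  ljFuel (bank.length + 1) bank num concat

-- ===== PORT B =====
-- 'for j in range(1, end): if digits[j] > digits[best]: best = j'
def ljBest (ds : List Int) (e : Int) : Int :=
  (PySem.List.pyRange 1 e 1).foldl
    (fun best j => if PySem.List.pyGetD ds j 0 > PySem.List.pyGetD ds best 0 then j else best) 0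

-- _greedy, counting down num (already known positive and ≤ len(digits) at each call)
def ljGreedy : List Int → Nat → String
  | _, 0 => ""
  | ds, n + 1 =>
    let best := ljBest ds ((ds.length : Int) - ((n + 1 : Nat) : Int) + 1)
    PySem.Int.toStr (PySem.List.pyGetD ds best 0) ++
      ljGreedy (PySem.List.slice ds (some (best + 1)) none) n

def largest_joltage_iter_alt (bank : List Int) (num : Int) (concat : String) : Option String :=
  if num = 0 then some concat
  else if num < 0 then none
  else
    let ds := bank.filter (fun d => decide (1 ≤ d ∧ d ≤ 9))
    if (ds.length : Int) < num then none
    else some (concat ++ ljGreedy ds num.toNat)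

-- ===== PRECONDITION & SPEC =====
def Spec_largest_joltage_iter (bank : List Int) (num : Int) (concat : String) (out : Option String) : Prop := out = largest_joltage_iter_alt bank num concat
instance (bank : List Int) (num : Int) (concat : String) (out : Option String) : Decidable (Spec_largest_joltage_iter bank num concat out) := by unfold Spec_largest_joltage_iter; infer_instance

-- ===== CLAIM (what is proved, stated in full; the proofs are below) =====
def Claim_equal_largest_joltage_iter : Prop := ∀ (bank : List Int) (num : Int) (concat : String), Dom_largest_joltage_iter bank num concat → Spec_largest_joltage_iter bank num concat (largest_joltage_iter bank num concat)

-- ===== LEMMAS AND PROOFS =====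

def digitsOf (bank : List Int) : List Int := bank.filter (fun d => decide (1 ≤ d ∧ d ≤ 9))

def refA (bank : List Int) (num : Int) (concat : String) : Option String :=
  if num = 0 then some concat
  else if num < 0 then none
  else if ((digitsOf bank).length : Int) < num then none
  else some (concat ++ ljGreedy (digitsOf bank) num.toNat)

theorem alt_eq_ref (bank : List Int) (num : Int) (concat : String) :
    largest_joltage_iter_alt bank num concat = refA bank num concat := rfl

theorem scan_not_mem (d : Int) (bs : List Int) : d ∉ bs → ∀ k, ljScan bs d k = none := by
  induction bs with
  | nil => intro _ k; rfl
  | cons b bs ih =>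
    intro h k
    rw [ljScan, if_neg (fun hbd => h (by rw [← hbd]; exact List.mem_cons_self ..))]
    exact ih (fun hm => h (List.mem_cons_of_mem _ hm)) (k + 1)

theorem scan_first (d : Int) (pre post : List Int) :
    (∀ x ∈ pre, x ≠ d) → ∀ k, ljScan (pre ++ d :: post) d k = some (k + pre.length) := by
  induction pre generalizing post with
  | nil => intro _ k; simp [ljScan]
  | cons p pre ih =>
    intro h k
    rw [List.cons_append, ljScan, if_neg (h p (List.mem_cons_self ..))]
    rw [ih post (fun x hx => h x (List.mem_cons_of_mem _ hx)) (k + 1)]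
    congr 1
    simp
    try omega

theorem exists_first (d : Int) (bs : List Int) (h : d ∈ bs) :
    ∃ pre post, bs = pre ++ d :: post ∧ ∀ x ∈ pre, x ≠ d := by
  induction bs with
  | nil => cases h
  | cons b bs ih =>
    by_cases hb : b = d
    · exact ⟨[], bs, by rw [hb]; rfl, by simp⟩
    · have hd : d ∈ bs := by
        rcases List.mem_cons.1 h with h1 | h2
        · exact absurd h1.symm hb
        · exact h2
      obtain ⟨pre, post, hsplit, hfree⟩ := ih hd
      exact ⟨b :: pre, post, by rw [hsplit]; rfl, by
        intro x hx
        rcases List.mem_cons.1 hx with h1 | h2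
        · rw [h1]; exact hb
        · exact hfree x h2⟩

theorem digits_split (d : Int) (pre post : List Int) (h1 : 1 ≤ d) (h2 : d ≤ 9) :
    digitsOf (pre ++ d :: post) = digitsOf pre ++ d :: digitsOf post := by
  simp [digitsOf, List.filter_append, h1, h2]

theorem length_digits_le (bs : List Int) : (digitsOf bs).length ≤ bs.length := by
  unfold digitsOf
  exact List.length_filter_le (fun d => decide (1 ≤ d ∧ d ≤ 9)) bs

theorem drop_first (d : Int) (pre post : List Int) :
    (pre ++ d :: post).drop (pre.length + 1) = post := by
  induction pre with
  | nil => simp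
  | cons p pre ih => simpa using ih

theorem slice_succ_drop (xs : List Int) (i : Nat) :
    PySem.List.slice xs (some ((i : Int) + 1)) none = xs.drop (i + 1) := by
  rw [show ((i : Int) + 1) = ((i + 1 : Nat) : Int) by push_cast; ring]
  exact PySem.List.slice_from_natCast xs (i + 1)

theorem getD_append_length (l1 l2 : List Int) (x : Int) :
    (l1 ++ x :: l2).getD l1.length 0 = x := by
  induction l1 with
  | nil => rfl
  | cons a l1 ih => simpa using ih

theorem getD_append_lt (l1 l2 : List Int) (j : Nat) (h : j < l1.length) :
    (l1 ++ l2).getD j 0 = l1.getD j 0 := by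
  induction l1 generalizing j with
  | nil => cases h
  | cons a l1 ih =>
    cases j with
    | zero => rfl
    | succ j => simpa using ih j (by simpa using h)

theorem getD_mem (l : List Int) (j : Nat) (h : j < l.length) : l.getD j 0 ∈ l := by
  rw [List.getD_eq_getElem l 0 h]
  exact List.getElem_mem h

theorem bestFold_inv (ds : List Int) (e : Int) :
    ∀ (g : Nat) (k : Int) (b : Nat), k ≤ e → e ≤ (ds.length : Int) → (b : Int) < k →
    (∀ j : Nat, (j : Int) < k → ds.getD j 0 ≤ ds.getD b 0) →
    (∀ j : Nat, j < b → ds.getD j 0 < ds.getD b 0) →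
    (e - k).toNat = g →
    ∃ b' : Nat,
      (PySem.List.pyRange k e 1).foldl
        (fun best j => if PySem.List.pyGetD ds j 0 > PySem.List.pyGetD ds best 0 then j else best)
        (b : Int) = (b' : Int) ∧ (b' : Int) < e ∧
      (∀ j : Nat, (j : Int) < e → ds.getD j 0 ≤ ds.getD b' 0) ∧
      (∀ j : Nat, j < b' → ds.getD j 0 < ds.getD b' 0) := by
  intro g
  induction g with
  | zero =>
    intro k b hke hel hbk hmax hfirst hfuel
    rw [PySem.List.pyRange_one_eq_nil (by omega)]
    exact ⟨b, rfl, by omega, fun j hj => hmax j (by omega), hfirst⟩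
  | succ g ih =>
    intro k b hke hel hbk hmax hfirst hfuel
    have hklt : k < e := by omega
    have hk0 : (0 : Int) ≤ k := by
      have : (0 : Int) ≤ (b : Int) := Int.natCast_nonneg b
      omega
    have hkk : k = ((k.toNat : Nat) : Int) := (Int.toNat_of_nonneg hk0).symm
    rw [PySem.List.pyRange_one_cons hklt, List.foldl_cons]
    have hgb : PySem.List.pyGetD ds (b : Int) 0 = ds.getD b 0 := PySem.List.pyGetD_natCast ds b 0
    have hgk : PySem.List.pyGetD ds k 0 = ds.getD k.toNat 0 := by
      rw [hkk]; exact PySem.List.pyGetD_natCast ds k.toNat 0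
    by_cases hgt : PySem.List.pyGetD ds k 0 > PySem.List.pyGetD ds (b : Int) 0
    · rw [if_pos hgt]
      rw [hgb, hgk] at hgt
      rw [hkk]
      refine ih ((k.toNat : Nat) + 1) k.toNat (by omega) hel (by omega) ?_ ?_ (by omega)
      · intro j hj
        by_cases hjk : (j : Int) < k
        · exact le_of_lt (lt_of_le_of_lt (hmax j hjk) hgt)
        · have : j = k.toNat := by omega
          rw [this]
      · intro j hj
        have hjk : (j : Int) < k := by omega
        exact lt_of_le_of_lt (hmax j hjk) hgt
    · rw [if_neg hgt]
      rw [hgb, hgk] at hgt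
      refine ih (k + 1) b (by omega) hel (by omega) ?_ hfirst (by omega)
      intro j hj
      by_cases hjk : (j : Int) < k
      · exact hmax j hjk
      · have : j = k.toNat := by omega
        rw [this]
        omega

theorem ljBest_spec (ds : List Int) (e : Int) (h1 : 1 ≤ e) (h2 : e ≤ (ds.length : Int)) :
    ∃ b : Nat, ljBest ds e = (b : Int) ∧ (b : Int) < e ∧
      (∀ j : Nat, (j : Int) < e → ds.getD j 0 ≤ ds.getD b 0) ∧
      (∀ j : Nat, j < b → ds.getD j 0 < ds.getD b 0) := by
  have h := bestFold_inv ds e (e - 1).toNat 1 0 h1 h2 (by omega)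
    (fun j hj => by
      have : j = 0 := by omega
      rw [this])
    (fun j hj => by omega) (by omega)
  simpa [ljBest] using h

theorem refA_ok (bank : List Int) (num : Int) (concat : String) (h0 : 0 ≤ num)
    (h : num ≤ ((digitsOf bank).length : Int)) :
    refA bank num concat = some (concat ++ ljGreedy (digitsOf bank) num.toNat) := by
  by_cases hz : num = 0
  · subst hz
    rw [refA, if_pos rfl]
    simp [ljGreedy]
  · rw [refA, if_neg hz, if_neg (by omega), if_neg (by omega)]

theorem refA_infeasible (bank : List Int) (num : Int) (concat : String) (h0 : 0 < num)
    (h : ((digitsOf bank).length : Int) < num) : refA bank num concat = none := by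
  rw [refA, if_neg (by omega), if_neg (by omega), if_pos h]

theorem refA_neg (bank : List Int) (num : Int) (concat : String) (h : num < 0) :
    refA bank num concat = none := by
  rw [refA, if_neg (by omega), if_pos h]

theorem outer_neg (f : Nat) (bank : List Int) (num : Int) (concat : String)
    (HI : ∀ b' : List Int, b'.length < f → ∀ n' c', ljFuel f b' n' c' = refA b' n' c')
    (hb : bank.length ≤ f) (hnum : num < 0) :
    ∀ L, ljOuter (ljFuel f) bank num concat L = none := by
  intro L
  induction L with
  | nil => rw [ljOuter]
  | cons d L ih =>
    rw [ljOuter]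
    by_cases hd : d ∈ bank
    · obtain ⟨pre, post, hsplit, hfree⟩ := exists_first d bank hd
      have hscan : ljScan bank d 0 = some (0 + pre.length) := by
        rw [hsplit]; exact scan_first d pre post hfree 0
      have hpost : bank.drop (0 + pre.length + 1) = post := by
        rw [hsplit]; simpa using drop_first d pre post
      have hlenpost : post.length < f := by
        have : bank.length = pre.length + post.length + 1 := by
          rw [hsplit]; simp; try omega
        omega
      simp only [hscan, slice_succ_drop, hpost,
        HI post hlenpost (num - 1) (concat ++ PySem.Int.toStr d),
        refA_neg post (num - 1) (concat ++ PySem.Int.toStr d) (by omega)]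
      exact ih
    · simp only [scan_not_mem d bank hd 0]
      exact ih

theorem outer_skip_one (f : Nat) (bank : List Int) (num : Int) (concat : String) (d : Int)
    (L : List Int)
    (HI : ∀ b' : List Int, b'.length < f → ∀ n' c', ljFuel f b' n' c' = refA b' n' c')
    (hb : bank.length ≤ f) (hnum : 1 ≤ num)
    (hinf : ∀ pre post, bank = pre ++ d :: post → (∀ x ∈ pre, x ≠ d) →
      ((digitsOf post).length : Int) < num - 1) :
    ljOuter (ljFuel f) bank num concat (d :: L) = ljOuter (ljFuel f) bank num concat L := by
  rw [ljOuter]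
  by_cases hd : d ∈ bank
  · obtain ⟨pre, post, hsplit, hfree⟩ := exists_first d bank hd
    have hscan : ljScan bank d 0 = some (0 + pre.length) := by
      rw [hsplit]; exact scan_first d pre post hfree 0
    have hpost : bank.drop (0 + pre.length + 1) = post := by
      rw [hsplit]; simpa using drop_first d pre post
    have hlenpost : post.length < f := by
      have : bank.length = pre.length + post.length + 1 := by
        rw [hsplit]; simp; try omega
      omega
    have hinf' := hinf pre post hsplit hfree
    simp only [hscan, slice_succ_drop, hpost,
      HI post hlenpost (num - 1) (concat ++ PySem.Int.toStr d),
      refA_infeasible post (num - 1) (concat ++ PySem.Int.toStr d) (by omega) hinf']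
  · simp only [scan_not_mem d bank hd 0]

theorem outer_found (f : Nat) (bank : List Int) (num : Int) (concat : String) (d : Int)
    (L : List Int) (pre post : List Int)
    (HI : ∀ b' : List Int, b'.length < f → ∀ n' c', ljFuel f b' n' c' = refA b' n' c')
    (hb : bank.length ≤ f) (hnum : 1 ≤ num)
    (hsplit : bank = pre ++ d :: post) (hfree : ∀ x ∈ pre, x ≠ d)
    (hfeas : num - 1 ≤ ((digitsOf post).length : Int)) :
    ljOuter (ljFuel f) bank num concat (d :: L) =
      some ((concat ++ PySem.Int.toStr d) ++ ljGreedy (digitsOf post) (num - 1).toNat) := by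
  rw [ljOuter]
  have hscan : ljScan bank d 0 = some (0 + pre.length) := by
    rw [hsplit]; exact scan_first d pre post hfree 0
  have hpost : bank.drop (0 + pre.length + 1) = post := by
    rw [hsplit]; simpa using drop_first d pre post
  have hlenpost : post.length < f := by
    have : bank.length = pre.length + post.length + 1 := by
      rw [hsplit]; simp; try omega
    omega
  simp only [hscan, slice_succ_drop, hpost,
    HI post hlenpost (num - 1) (concat ++ PySem.Int.toStr d),
    refA_ok post (num - 1) (concat ++ PySem.Int.toStr d) (by omega) hfeas]

theorem outer_skip_list (f : Nat) (bank : List Int) (num : Int) (concat : String) (m : Int)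
    (HI : ∀ b' : List Int, b'.length < f → ∀ n' c', ljFuel f b' n' c' = refA b' n' c')
    (hb : bank.length ≤ f) (hnum : 1 ≤ num)
    (hsk : ∀ d : Int, d ≤ 9 → m < d → ∀ pre post, bank = pre ++ d :: post →
      (∀ x ∈ pre, x ≠ d) → ((digitsOf post).length : Int) < num - 1) :
    ∀ L1 L2 : List Int, (∀ d ∈ L1, d ≤ 9 ∧ m < d) →
      ljOuter (ljFuel f) bank num concat (L1 ++ L2) = ljOuter (ljFuel f) bank num concat L2 := by
  intro L1
  induction L1 with
  | nil => intro L2 _; rfl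
  | cons d L1 ih =>
    intro L2 hmem
    have hd := hmem d (List.mem_cons_self ..)
    rw [List.cons_append,
      outer_skip_one f bank num concat d (L1 ++ L2) HI hb hnum (hsk d hd.1 hd.2)]
    exact ih L2 (fun x hx => hmem x (List.mem_cons_of_mem _ hx))

theorem main_lemma (f : Nat) : ∀ bank : List Int, bank.length < f →
    ∀ num concat, ljFuel f bank num concat = refA bank num concat := by
  induction f with
  | zero => intro bank h; exact absurd h (Nat.not_lt_zero _)
  | succ f IH =>
    intro bank hlen num concat
    have hb : bank.length ≤ f := by omega
    rw [ljFuel]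
    by_cases h0 : num = 0
    · rw [if_pos h0, refA, if_pos h0]
    by_cases hneg : num < 0
    · rw [if_neg h0, if_neg (by
        have : (0 : Int) ≤ (bank.length : Int) := Int.natCast_nonneg _
        omega)]
      rw [outer_neg f bank num concat IH hb hneg _, refA_neg bank num concat hneg]
    have hnum1 : 1 ≤ num := by omega
    rw [if_neg h0]
    by_cases hlt : (bank.length : Int) < num
    · rw [if_pos hlt, refA_infeasible bank num concat (by omega) (by
        have := length_digits_le bank
        omega)]
    rw [if_neg hlt]
    have hrange : PySem.List.pyRange 9 0 (-1) = [9, 8, 7, 6, 5, 4, 3, 2, 1] := by decide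
    by_cases hn : ((digitsOf bank).length : Int) < num
    · -- infeasible: every digit is skipped
      have hskip : ∀ d : Int, d ≤ 9 → (0 : Int) < d → ∀ pre post, bank = pre ++ d :: post →
          (∀ x ∈ pre, x ≠ d) → ((digitsOf post).length : Int) < num - 1 := by
        intro d h2 h1 pre post hsplit hfree
        have hsp : digitsOf bank = digitsOf pre ++ d :: digitsOf post := by
          rw [hsplit]; exact digits_split d pre post (by omega) h2
        have : (digitsOf bank).length = (digitsOf pre).length + ((digitsOf post).length + 1) := by
          rw [hsp]; simp
        omega
      rw [hrange, show ([9, 8, 7, 6, 5, 4, 3, 2, 1] : List Int) =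
          [9, 8, 7, 6, 5, 4, 3, 2, 1] ++ ([] : List Int) by simp,
        outer_skip_list f bank num concat 0 IH hb hnum1 hskip
          [9, 8, 7, 6, 5, 4, 3, 2, 1] [] (by decide),
        ljOuter, refA_infeasible bank num concat (by omega) hn]
    · -- feasible: the greedy pick
      push_neg at hn
      have h1e : (1 : Int) ≤ ((digitsOf bank).length : Int) - num + 1 := by omega
      obtain ⟨b, hbeq, hblt, hmax, hfirst⟩ :=
        ljBest_spec (digitsOf bank) (((digitsOf bank).length : Int) - num + 1) h1e (by omega)
      have hbn : b < (digitsOf bank).length := by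
        have : ((b : Nat) : Int) < ((digitsOf bank).length : Int) := by omega
        exact_mod_cast this
      obtain ⟨m, hm⟩ : ∃ m, (digitsOf bank).getD b 0 = m := ⟨_, rfl⟩
      rw [hm] at hmax hfirst
      have hmmem : m ∈ digitsOf bank := hm ▸ getD_mem (digitsOf bank) b hbn
      have hmb : (1 ≤ m ∧ m ≤ 9) ∧ m ∈ bank := by
        have := hmmem
        simp only [digitsOf, List.mem_filter, decide_eq_true_eq] at this
        exact ⟨this.2, this.1⟩
      obtain ⟨⟨hm1, hm9⟩, hmbank⟩ := hmb
      obtain ⟨pre, post, hsplit, hfree⟩ := exists_first m bank hmbank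
      have hdsplit : digitsOf bank = digitsOf pre ++ m :: digitsOf post := by
        rw [hsplit]; exact digits_split m pre post hm1 hm9
      have hlensum : (digitsOf bank).length = (digitsOf pre).length + ((digitsOf post).length + 1) := by
        rw [hdsplit]; simp
      have hqm : (digitsOf bank).getD (digitsOf pre).length 0 = m := by
        rw [hdsplit]; exact getD_append_length (digitsOf pre) (digitsOf post) m
      have hqne : ∀ j, j < (digitsOf pre).length → (digitsOf bank).getD j 0 ≠ m := by
        intro j hj
        rw [hdsplit, getD_append_lt (digitsOf pre) (m :: digitsOf post) j hj]
        have hmem := getD_mem (digitsOf pre) j hj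
        exact hfree _ (List.mem_of_mem_filter hmem)
      have hqb : (digitsOf pre).length = b := by
        rcases lt_trichotomy (digitsOf pre).length b with h | h | h
        · have h2 := hfirst _ h
          omega
        · exact h
        · exact absurd hm (hqne b h)
      have hdrop : digitsOf post = (digitsOf bank).drop (b + 1) := by
        rw [hdsplit, ← hqb, drop_first]
      have hfeas : num - 1 ≤ ((digitsOf post).length : Int) := by omega
      have hskipgt : ∀ d : Int, d ≤ 9 → m < d → ∀ pre' post', bank = pre' ++ d :: post' →
          (∀ x ∈ pre', x ≠ d) → ((digitsOf post').length : Int) < num - 1 := by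
        intro d hd9 hmd pre' post' hs' hf'
        by_contra hge
        push_neg at hge
        have hdsplit' : digitsOf bank = digitsOf pre' ++ d :: digitsOf post' := by
          rw [hs']; exact digits_split d pre' post' (by omega) hd9
        have hlen' : (digitsOf bank).length = (digitsOf pre').length + ((digitsOf post').length + 1) := by
          rw [hdsplit']; simp
        have hq'd : (digitsOf bank).getD (digitsOf pre').length 0 = d := by
          rw [hdsplit']; exact getD_append_length (digitsOf pre') (digitsOf post') d
        have hq'e : (((digitsOf pre').length : Nat) : Int) < ((digitsOf bank).length : Int) - num + 1 := by
          omega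
        have hle := hmax (digitsOf pre').length hq'e
        omega
      have hnt : num.toNat = (num - 1).toNat + 1 := by omega
      have hcast : (((num - 1).toNat + 1 : Nat) : Int) = num := by omega
      have hgreedy : ljGreedy (digitsOf bank) num.toNat =
          PySem.Int.toStr m ++ ljGreedy ((digitsOf bank).drop (b + 1)) (num - 1).toNat := by
        rw [hnt, ljGreedy]
        simp only [hcast, hbeq, PySem.List.pyGetD_natCast, hm, slice_succ_drop]
      have hfound := fun (L : List Int) =>
        outer_found f bank num concat m L pre post IH hb hnum1 hsplit hfree hfeas
      simp only [hdrop] at hfound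
      have hskips := fun (L1 L2 : List Int) (hmem : ∀ d ∈ L1, d ≤ 9 ∧ m < d) =>
        outer_skip_list f bank num concat m IH hb hnum1 hskipgt L1 L2 hmem
      rw [refA_ok bank num concat (by omega) hn, hgreedy, hrange]
      interval_cases m
      · rw [show ([9, 8, 7, 6, 5, 4, 3, 2, 1] : List Int) =
            [9, 8, 7, 6, 5, 4, 3, 2] ++ 1 :: [] by rfl,
          hskips [9, 8, 7, 6, 5, 4, 3, 2] (1 :: []) (by decide), hfound [],
          String.append_assoc]
      · rw [show ([9, 8, 7, 6, 5, 4, 3, 2, 1] : List Int) =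
            [9, 8, 7, 6, 5, 4, 3] ++ 2 :: [1] by rfl,
          hskips [9, 8, 7, 6, 5, 4, 3] (2 :: [1]) (by decide), hfound [1],
          String.append_assoc]
      · rw [show ([9, 8, 7, 6, 5, 4, 3, 2, 1] : List Int) =
            [9, 8, 7, 6, 5, 4] ++ 3 :: [2, 1] by rfl,
          hskips [9, 8, 7, 6, 5, 4] (3 :: [2, 1]) (by decide), hfound [2, 1],
          String.append_assoc]
      · rw [show ([9, 8, 7, 6, 5, 4, 3, 2, 1] : List Int) =
            [9, 8, 7, 6, 5] ++ 4 :: [3, 2, 1] by rfl,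
          hskips [9, 8, 7, 6, 5] (4 :: [3, 2, 1]) (by decide), hfound [3, 2, 1],
          String.append_assoc]
      · rw [show ([9, 8, 7, 6, 5, 4, 3, 2, 1] : List Int) =
            [9, 8, 7, 6] ++ 5 :: [4, 3, 2, 1] by rfl,
          hskips [9, 8, 7, 6] (5 :: [4, 3, 2, 1]) (by decide), hfound [4, 3, 2, 1],
          String.append_assoc]
      · rw [show ([9, 8, 7, 6, 5, 4, 3, 2, 1] : List Int) =
            [9, 8, 7] ++ 6 :: [5, 4, 3, 2, 1] by rfl,
          hskips [9, 8, 7] (6 :: [5, 4, 3, 2, 1]) (by decide), hfound [5, 4, 3, 2, 1],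
          String.append_assoc]
      · rw [show ([9, 8, 7, 6, 5, 4, 3, 2, 1] : List Int) =
            [9, 8] ++ 7 :: [6, 5, 4, 3, 2, 1] by rfl,
          hskips [9, 8] (7 :: [6, 5, 4, 3, 2, 1]) (by decide), hfound [6, 5, 4, 3, 2, 1],
          String.append_assoc]
      · rw [show ([9, 8, 7, 6, 5, 4, 3, 2, 1] : List Int) =
            [9] ++ 8 :: [7, 6, 5, 4, 3, 2, 1] by rfl,
          hskips [9] (8 :: [7, 6, 5, 4, 3, 2, 1]) (by decide), hfound [7, 6, 5, 4, 3, 2, 1],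
          String.append_assoc]
      · rw [show ([9, 8, 7, 6, 5, 4, 3, 2, 1] : List Int) =
            [] ++ 9 :: [8, 7, 6, 5, 4, 3, 2, 1] by rfl,
          hskips [] (9 :: [8, 7, 6, 5, 4, 3, 2, 1]) (by decide), hfound [8, 7, 6, 5, 4, 3, 2, 1],
          String.append_assoc]

-- ===== VERDICT (by name: the statement is the Claim_ definition above) =====
theorem largest_joltage_iter_spec : Claim_equal_largest_joltage_iter := by
  intro bank num concat _
  unfold Spec_largest_joltage_iter
  rw [largest_joltage_iter, alt_eq_ref, main_lemma (bank.length + 1) bank (by omega)]
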